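-- pv_equiv track=rewrite | github.com/Was404/metod_prog_6sem | BLOCK-2/H.py | max_segments_length
-- ===== SOURCE A (Python) =====
-- def count_segments(lengths, target_length):
--     count = 0
--
--     for length in lengths:
--         count += length // target_length
--
--     return count
--
-- def max_segments_length(N, K, lengths):
--     low, high = 1, max(lengths)
--
--     while low < high:
--         mid = (low + high + 1) // 2
--
--         if count_segments(lengths, mid) >= K:
--             low = mid
--         else:
--             high = mid - 1
--
--     return low
-- ===== SOURCE B (Python) =====
-- def max_segments_length(N, K, lengths):
--     # The maximal feasible piece length must equal length // q for some rod and
--     # quotient q, so enumerate those O(sqrt(length)) candidates per rod.  best is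
--     # the largest feasible candidate so far (1 when none), bad the smallest known
--     # infeasible one: candidates outside the open window (best, bad) are skipped.
--     best = 1
--     bad = max(lengths) + 1
--     for length in lengths:
--         q = 1
--         while q * q <= length:
--             for t in (q, length // q):
--                 if best < t < bad:
--                     total = 0
--                     for l2 in lengths:
--                         total += l2 // t
--                     if total >= K:
--                         best = t
--                     else:
--                         bad = t
--             q += 1
--     return best
-- ===== Notes on version B (the rewrite author's own statement) =====
-- stated objective: alternative
-- what changed: Replaces the low/high binary search by divisor-candidate enumeration: the maximal feasible piece length must equal length//q for some rod and quotient, so B walks the O(sqrt(length)) floor-quotient candidates of every rod, keeping best = largest feasible candidate (1 when none) and bad = smallest infeasible one and skipping candidates outside the open window (best, bad).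
-- outside the precondition, e.g. on max_segments_length(1, -1, [8, -7, -1]): A returns 2, B returns 8
import Mathlib
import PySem

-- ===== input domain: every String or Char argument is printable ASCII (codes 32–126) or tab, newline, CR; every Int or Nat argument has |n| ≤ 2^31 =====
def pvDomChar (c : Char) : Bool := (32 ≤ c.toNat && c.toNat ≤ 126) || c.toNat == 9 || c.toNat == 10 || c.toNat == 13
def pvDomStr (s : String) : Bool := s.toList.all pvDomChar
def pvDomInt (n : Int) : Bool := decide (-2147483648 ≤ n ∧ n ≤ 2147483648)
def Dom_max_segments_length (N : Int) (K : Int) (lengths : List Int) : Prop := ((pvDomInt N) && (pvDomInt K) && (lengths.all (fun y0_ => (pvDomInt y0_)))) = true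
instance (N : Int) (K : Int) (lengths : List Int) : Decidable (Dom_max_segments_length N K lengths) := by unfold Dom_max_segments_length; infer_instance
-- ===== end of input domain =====

-- B replaces A's low/high binary search by divisor-candidate enumeration: the answer must be
-- a floor-quotient length//q of some rod, and B keeps the largest feasible such candidate
-- inside a shrinking (best, bad) window (alternative algorithm, not claimed faster).


-- ===== PORT A =====
def count_segments (lengths : List Int) (target_length : Int) : Int :=
  lengths.foldl (fun count length => count + PySem.Int.floordiv length target_length) 0

-- the 'while low < high' loop of A
def pvBsLoop (K : Int) (lengths : List Int) (low high : Int) : Int :=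
  if _h : low < high then
    let mid := PySem.Int.floordiv (low + high + 1) 2
    if count_segments lengths mid ≥ K then pvBsLoop K lengths mid high
    else pvBsLoop K lengths low (mid - 1)
  else low
termination_by (high - low).toNat
decreasing_by
  · simp only [PySem.Int.floordiv_eq_ediv_of_pos (by norm_num : (0:Int) < 2)]
    omega
  · simp only [PySem.Int.floordiv_eq_ediv_of_pos (by norm_num : (0:Int) < 2)]
    omega

def max_segments_length (N : Int) (K : Int) (lengths : List Int) : Int :=
  -- max(lengths): Python raises ValueError on []; Pre_ excludes that, so .getD 0 is unreachable
  let high := (PySem.List.max? lengths (fun y => y)).getD 0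
  pvBsLoop K lengths 1 high

-- ===== PORT B =====
-- the body of "if best < t < bad: ... total loop ... update best/bad" for one candidate t
def pvTryCand (K : Int) (lengths : List Int) (st : Int × Int) (t : Int) : Int × Int :=
  if st.1 < t ∧ t < st.2 then
    if (lengths.foldl (fun total l2 => total + PySem.Int.floordiv l2 t) 0) ≥ K
    then (t, st.2) else (st.1, t)
  else st

-- "q = 1; while q * q <= length: for t in (q, length // q): ...; q += 1"
def pvRodLoop (K : Int) (lengths : List Int) (l : Int) (q : Int) (st : Int × Int) : Int × Int :=
  if _h : q * q ≤ l then
    pvRodLoop K lengths l (q + 1)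
      (pvTryCand K lengths (pvTryCand K lengths st q) (PySem.Int.floordiv l q))
  else st
termination_by (l + 1 - q).toNat
decreasing_by
  have h0 : 0 ≤ l := le_trans (mul_self_nonneg q) _h
  have hq : q ≤ l := by
    by_cases h : q ≤ 0
    · omega
    · nlinarith
  omega

def max_segments_length_alt (N : Int) (K : Int) (lengths : List Int) : Int :=
  -- best starts at 1, bad (smallest known infeasible candidate) at max(lengths) + 1
  let M := (PySem.List.max? lengths (fun y => y)).getD 0
  (lengths.foldl (fun st length => pvRodLoop K lengths length 1 st) (1, M + 1)).1

-- ===== PRECONDITION & SPEC =====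
-- Pre_ excludes the empty list (max([]) raises ValueError in A) and lists containing both a
-- negative and a positive length: rod lengths are naturally non-negative, and with mixed signs
-- sum(l//t) is not antitone in t, so A's binary-search value there is an artefact of probe order.
def Pre_max_segments_length (N : Int) (K : Int) (lengths : List Int) : Prop :=
  lengths ≠ [] ∧ ((∀ l ∈ lengths, 0 ≤ l) ∨ (∀ l ∈ lengths, l ≤ 0))
instance (N : Int) (K : Int) (lengths : List Int) : Decidable (Pre_max_segments_length N K lengths) := by unfold Pre_max_segments_length; infer_instance

def pvWitness_max_segments_length : Int × Int × List Int := (3, 2, [5, 3])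

def Spec_max_segments_length (N : Int) (K : Int) (lengths : List Int) (out : Int) : Prop := out = max_segments_length_alt N K lengths
instance (N : Int) (K : Int) (lengths : List Int) (out : Int) : Decidable (Spec_max_segments_length N K lengths out) := by unfold Spec_max_segments_length; infer_instance

-- ===== CLAIM (what is proved, stated in full; the proofs are below) =====
def Claim_equal_max_segments_length : Prop := ∀ (N : Int) (K : Int) (lengths : List Int), Dom_max_segments_length N K lengths → Pre_max_segments_length N K lengths → Spec_max_segments_length N K lengths (max_segments_length N K lengths)

-- ===== LEMMAS AND PROOFS =====

-- 'r is the answer': the greatest t in [1,M] with count ≥ K, or 1 if there is none.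
def pvIsBest (K : Int) (lengths : List Int) (M r : Int) : Prop :=
  1 ≤ r ∧ r ≤ max M 1 ∧ (count_segments lengths r ≥ K ∨ r = 1) ∧
    ∀ t, r < t → t ≤ M → ¬ (count_segments lengths t ≥ K)

lemma pvIsBest_unique {K : Int} {lengths : List Int} {M a b : Int}
    (ha : pvIsBest K lengths M a) (hb : pvIsBest K lengths M b) : a = b := by
  obtain ⟨ha1, ha2, ha3, ha4⟩ := ha
  obtain ⟨hb1, hb2, hb3, hb4⟩ := hb
  by_contra hne
  rcases lt_trichotomy a b with h | h | h
  · have hbM : b ≤ M := by omega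
    have := ha4 b h hbM
    rcases hb3 with h3 | h3
    · exact this h3
    · omega
  · exact hne h
  · have haM : a ≤ M := by omega
    have := hb4 a h haM
    rcases ha3 with h3 | h3
    · exact this h3
    · omega

lemma pvEdiv_antitone {l s t : Int} (hl : 0 ≤ l) (hs : 1 ≤ s) (hst : s ≤ t) :
    l / t ≤ l / s := by
  rw [Int.le_ediv_iff_mul_le (by omega : (0:Int) < s)]
  calc l / t * s ≤ l / t * t := by
        apply mul_le_mul_of_nonneg_left hst
        exact Int.ediv_nonneg hl (by omega)
    _ ≤ l := Int.ediv_mul_le l (by omega)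

lemma pvCount_eq_sum (lengths : List Int) (t : Int) :
    count_segments lengths t = (lengths.map (fun l => PySem.Int.floordiv l t)).sum := by
  rw [count_segments, List.sum_eq_foldl, List.foldl_map]

lemma pvCount_antitone {lengths : List Int} (hnn : ∀ l ∈ lengths, 0 ≤ l)
    {s t : Int} (hs : 1 ≤ s) (hst : s ≤ t) :
    count_segments lengths t ≤ count_segments lengths s := by
  rw [pvCount_eq_sum, pvCount_eq_sum]
  apply List.sum_le_sum
  intro l hl
  rw [PySem.Int.floordiv_eq_ediv_of_pos (by omega), PySem.Int.floordiv_eq_ediv_of_pos (by omega)]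
  exact pvEdiv_antitone (hnn l hl) hs hst

-- A's loop computes the best value
lemma pvBsLoop_isBest {K M : Int} {lengths : List Int} (hnn : ∀ l ∈ lengths, 0 ≤ l) :
    ∀ n (low high : Int), (high - low).toNat = n →
      1 ≤ low → (count_segments lengths low ≥ K ∨ low = 1) →
      high ≤ M → (∀ t, high < t → t ≤ M → ¬ (count_segments lengths t ≥ K)) →
      (low ≤ high ∨ low = 1) →
      pvIsBest K lengths M (pvBsLoop K lengths low high) := by
  intro n
  induction n using Nat.strong_induction_on with
  | _ n ih =>
    intro low high hn h1 hP hhM htop hlh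
    by_cases hlt : low < high
    · have hmid : low + 1 ≤ PySem.Int.floordiv (low + high + 1) 2 ∧
          PySem.Int.floordiv (low + high + 1) 2 ≤ high := by
        rw [PySem.Int.floordiv_eq_ediv_of_pos (by norm_num)]
        omega
      rw [pvBsLoop, dif_pos hlt]
      show pvIsBest K lengths M
        (if count_segments lengths (PySem.Int.floordiv (low + high + 1) 2) ≥ K then _ else _)
      split_ifs with hc
      · exact ih ((high - PySem.Int.floordiv (low + high + 1) 2).toNat) (by omega) _ _ rfl
          (by omega) (Or.inl hc) hhM htop (Or.inl hmid.2)
      · refine ih ((PySem.Int.floordiv (low + high + 1) 2 - 1 - low).toNat) (by omega) _ _ rfl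
          h1 hP (by omega) ?_ (Or.inl (by omega))
        intro t ht htM hPt
        by_cases h' : high < t
        · exact htop t h' htM hPt
        · exact hc (le_trans hPt (pvCount_antitone hnn (by omega) (by omega)))
    · rw [pvBsLoop, dif_neg hlt]
      refine ⟨h1, by omega, hP, ?_⟩
      intro t ht htM
      exact htop t (by omega) htM

-- pvTryCand with the inner total-loop written as count_segments (they are definitionally equal)
lemma pvTryCand_eq (K : Int) (lengths : List Int) (st : Int × Int) (t : Int) :
    pvTryCand K lengths st t =
      if st.1 < t ∧ t < st.2 then
        if count_segments lengths t ≥ K then (t, st.2) else (st.1, t)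
      else st := rfl

-- loop invariant of B: best is feasible (or still 1), bad is infeasible (or still M+1)
def pvInv (K M : Int) (lengths : List Int) (st : Int × Int) : Prop :=
  1 ≤ st.1 ∧ st.1 < st.2 ∧ st.2 ≤ M + 1 ∧
    (count_segments lengths st.1 ≥ K ∨ st.1 = 1) ∧
    (¬ count_segments lengths st.2 ≥ K ∨ st.2 = M + 1)

lemma pvTry_inv {K M : Int} {lengths : List Int}
    (hnn : ∀ l ∈ lengths, 0 ≤ l) {st : Int × Int} {t : Int}
    (hInv : pvInv K M lengths st) (h1 : 1 ≤ t) (hM : t ≤ M) :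
    pvInv K M lengths (pvTryCand K lengths st t) ∧
      st.1 ≤ (pvTryCand K lengths st t).1 ∧
      (count_segments lengths t ≥ K → t ≤ (pvTryCand K lengths st t).1) := by
  obtain ⟨hi1, hi2, hi3, hi4, hi5⟩ := hInv
  rw [pvTryCand_eq]
  split_ifs with hw hc
  · exact ⟨⟨by omega, by omega, hi3, Or.inl hc, hi5⟩, by omega, fun _ => le_refl t⟩
  · refine ⟨⟨hi1, by omega, by omega, hi4, Or.inl hc⟩, le_refl _, fun hf => absurd hf hc⟩
  · refine ⟨⟨hi1, hi2, hi3, hi4, hi5⟩, le_refl _, fun hf => ?_⟩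
    by_cases hle : t ≤ st.1
    · exact hle
    · exfalso
      have hst2 : st.2 ≤ t := by omega
      have hne : st.2 ≠ M + 1 := by omega
      have hbadinf : ¬ count_segments lengths st.2 ≥ K := by tauto
      exact hbadinf (le_trans hf (pvCount_antitone hnn (by omega) hst2))

lemma pvRod_inv {K M : Int} {lengths : List Int}
    (hnn : ∀ l ∈ lengths, 0 ≤ l) {l : Int} (h0l : 0 ≤ l) (hlM : l ≤ M) :
    ∀ n (q : Int) (st : Int × Int), (l + 1 - q).toNat = n → 1 ≤ q →
      pvInv K M lengths st →
      pvInv K M lengths (pvRodLoop K lengths l q st) ∧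
        st.1 ≤ (pvRodLoop K lengths l q st).1 ∧
        (∀ t, (∃ q', q ≤ q' ∧ q' * q' ≤ l ∧ (t = q' ∨ t = PySem.Int.floordiv l q')) →
          count_segments lengths t ≥ K → t ≤ (pvRodLoop K lengths l q st).1) := by
  intro n
  induction n using Nat.strong_induction_on with
  | _ n ih =>
    intro q st hn h1q hInv
    rw [pvRodLoop]
    by_cases hg : q * q ≤ l
    · rw [dif_pos hg]
      have hql : q ≤ l := by nlinarith
      have hqM : q ≤ M := by omega
      have hfd1 : 1 ≤ PySem.Int.floordiv l q := by
        rw [PySem.Int.floordiv_eq_ediv_of_pos (by omega)]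
        rw [Int.le_ediv_iff_mul_le (by omega : (0:Int) < q)]
        nlinarith
      have hfdM : PySem.Int.floordiv l q ≤ M := by
        rw [PySem.Int.floordiv_eq_ediv_of_pos (by omega)]
        calc l / q ≤ l := Int.ediv_le_self q h0l
          _ ≤ M := hlM
      obtain ⟨i1, m1, f1⟩ := pvTry_inv hnn hInv h1q hqM
      obtain ⟨i2, m2, f2⟩ := pvTry_inv hnn i1 hfd1 hfdM
      obtain ⟨i3, m3, f3⟩ := ih ((l + 1 - (q + 1)).toNat) (by omega) (q + 1) _ rfl
        (by omega) i2
      refine ⟨i3, by omega, fun t ht hf => ?_⟩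
      obtain ⟨q', hq1, hq2, hq3⟩ := ht
      by_cases hq' : q' = q
      · subst hq'
        rcases hq3 with rfl | rfl
        · have := f1 hf
          omega
        · have := f2 hf
          omega
      · exact f3 t ⟨q', by omega, hq2, hq3⟩ hf
    · rw [dif_neg hg]
      refine ⟨hInv, le_refl _, fun t ht hf => ?_⟩
      exfalso
      obtain ⟨q', hq1, hq2, _⟩ := ht
      have : q * q ≤ q' * q' := by nlinarith
      omega

lemma pvFold_inv {K M : Int} {lengths : List Int}
    (hnn : ∀ l ∈ lengths, 0 ≤ l) (hlM : ∀ l ∈ lengths, l ≤ M) :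
    ∀ (ls : List Int), (∀ l ∈ ls, l ∈ lengths) → ∀ (st : Int × Int),
      pvInv K M lengths st →
      pvInv K M lengths (ls.foldl (fun st length => pvRodLoop K lengths length 1 st) st) ∧
        st.1 ≤ (ls.foldl (fun st length => pvRodLoop K lengths length 1 st) st).1 ∧
        (∀ l ∈ ls, ∀ t,
          (∃ q', 1 ≤ q' ∧ q' * q' ≤ l ∧ (t = q' ∨ t = PySem.Int.floordiv l q')) →
          count_segments lengths t ≥ K →
          t ≤ (ls.foldl (fun st length => pvRodLoop K lengths length 1 st) st).1) := by
  intro ls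
  induction ls with
  | nil => intro _ st hInv; exact ⟨hInv, le_refl _, fun l hl => absurd hl (by simp)⟩
  | cons a ls ihl =>
    intro hmem st hInv
    have ha : a ∈ lengths := hmem a List.mem_cons_self
    obtain ⟨i1, m1, f1⟩ := pvRod_inv hnn (hnn a ha) (hlM a ha) ((a + 1 - 1).toNat) 1 st
      rfl (le_refl 1) hInv
    obtain ⟨i2, m2, f2⟩ := ihl (fun l hl => hmem l (List.mem_cons_of_mem a hl)) _ i1
    rw [List.foldl_cons]
    refine ⟨i2, by omega, fun l hl t ht hf => ?_⟩
    rw [List.mem_cons] at hl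
    rcases hl with rfl | hl
    · have := f1 t ht hf
      omega
    · exact f2 l hl t ht hf

-- the maximal feasible piece length has the floor-quotient candidate form
lemma pvT0_cand {K M t0 : Int} {lengths : List Int}
    (hnn : ∀ l ∈ lengths, 0 ≤ l) (hMmem : M ∈ lengths)
    (h1 : 1 ≤ t0) (hM : t0 ≤ M)
    (hfeas : count_segments lengths t0 ≥ K)
    (htop : ∀ t, t0 < t → t ≤ M → ¬ count_segments lengths t ≥ K) :
    ∃ l ∈ lengths, ∃ q, 1 ≤ q ∧ q * q ≤ l ∧
      (t0 = q ∨ t0 = PySem.Int.floordiv l q) := by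
  by_cases hMeq : t0 = M
  · -- t0 = M = M // 1 is a candidate of the rod of length M
    refine ⟨M, hMmem, 1, le_refl 1, by omega, Or.inr ?_⟩
    rw [PySem.Int.floordiv_eq_ediv_of_pos (by omega), Int.ediv_one, hMeq]
  · -- t0 < M: t0+1 is infeasible, so some rod l has l//(t0+1) < l//t0, and t0 = l // (l // t0)
    have hnf := htop (t0 + 1) (by omega) (by omega)
    have hlt : count_segments lengths (t0 + 1) < count_segments lengths t0 := by omega
    have hex : ∃ l ∈ lengths,
        PySem.Int.floordiv l (t0 + 1) ≠ PySem.Int.floordiv l t0 := by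
      by_contra hall
      push_neg at hall
      have : count_segments lengths (t0 + 1) = count_segments lengths t0 := by
        rw [pvCount_eq_sum, pvCount_eq_sum]
        congr 1
        exact List.map_congr_left hall
      omega
    obtain ⟨l, hl, hne⟩ := hex
    have h0l : 0 ≤ l := hnn l hl
    rw [PySem.Int.floordiv_eq_ediv_of_pos (by omega : (0:Int) < t0 + 1),
      PySem.Int.floordiv_eq_ediv_of_pos (by omega : (0:Int) < t0)] at hne
    have hle : l / (t0 + 1) ≤ l / t0 := pvEdiv_antitone h0l h1 (by omega)
    have hstrict : l / (t0 + 1) < l / t0 := lt_of_le_of_ne hle hne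
    set q := l / t0 with hq
    have hq1 : 1 ≤ q := by
      have : 0 ≤ l / (t0 + 1) := Int.ediv_nonneg h0l (by omega)
      omega
    have hqt0 : t0 * q ≤ l := by
      rw [mul_comm]
      calc q * t0 = l / t0 * t0 := by rw [hq]
        _ ≤ l := Int.ediv_mul_le l (by omega : t0 ≠ 0)
    have ht0q : t0 = l / q := by
      have ha : t0 ≤ l / q := by
        rw [Int.le_ediv_iff_mul_le (by omega : (0:Int) < q)]
        omega
      have hb : l / q ≤ t0 := by
        by_contra hcon
        have h2 : t0 + 1 ≤ l / q := by omega
        rw [Int.le_ediv_iff_mul_le (by omega : (0:Int) < q)] at h2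
        have h3 : q ≤ l / (t0 + 1) := by
          rw [Int.le_ediv_iff_mul_le (by omega : (0:Int) < t0 + 1), mul_comm]
          omega
        omega
      omega
    by_cases hqq : q * q ≤ l
    · refine ⟨l, hl, q, hq1, hqq, Or.inr ?_⟩
      rw [PySem.Int.floordiv_eq_ediv_of_pos (by omega)]
      exact ht0q
    · -- q is large, so t0 itself is a small candidate: t0 * t0 ≤ l
      have ht0q' : t0 < q := by nlinarith
      have htt : t0 * t0 ≤ l := by nlinarith
      exact ⟨l, hl, t0, h1, by nlinarith, Or.inl rfl⟩

-- no feasible t in [1, M] exceeds B's final best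
lemma pvFold_top {K M : Int} {lengths : List Int}
    (hnn : ∀ l ∈ lengths, 0 ≤ l) (hMmem : M ∈ lengths) (hlM : ∀ l ∈ lengths, l ≤ M)
    (hM1 : 1 ≤ M) :
    ∀ n (t : Int), (M - t).toNat = n → 1 ≤ t → t ≤ M → count_segments lengths t ≥ K →
      t ≤ (lengths.foldl (fun st length => pvRodLoop K lengths length 1 st) (1, M + 1)).1 := by
  intro n
  induction n using Nat.strong_induction_on with
  | _ n ih =>
    intro t hn h1 hM hf
    by_cases hex : ∃ t', t < t' ∧ t' ≤ M ∧ count_segments lengths t' ≥ K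
    · obtain ⟨t', ht1, ht2, ht3⟩ := hex
      have := ih ((M - t').toNat) (by omega) t' rfl (by omega) ht2 ht3
      omega
    · push_neg at hex
      have hcand := pvT0_cand hnn hMmem h1 hM hf
        (fun t' h1' h2' hcf => by have := hex t' h1' h2'; omega)
      obtain ⟨l, hl, q, hq1, hq2, hq3⟩ := hcand
      have hInit : pvInv K M lengths (1, M + 1) := by
        refine ⟨le_refl 1, by omega, by omega, Or.inr rfl, Or.inr rfl⟩
      obtain ⟨_, _, f⟩ := pvFold_inv hnn hlM lengths (fun l hl => hl) (1, M + 1) hInit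
      exact f l hl t ⟨q, hq1, hq2, hq3⟩ hf

-- B's windowed candidate scan satisfies the characterisation (lengths non-negative, M ≥ 1)
lemma pvAlt_isBest {K M : Int} {lengths : List Int}
    (hnn : ∀ l ∈ lengths, 0 ≤ l) (hMmem : M ∈ lengths) (hlM : ∀ l ∈ lengths, l ≤ M)
    (hM1 : 1 ≤ M) :
    pvIsBest K lengths M
      ((lengths.foldl (fun st length => pvRodLoop K lengths length 1 st) (1, M + 1)).1) := by
  have hInit : pvInv K M lengths (1, M + 1) := by
    refine ⟨le_refl 1, by omega, by omega, Or.inr rfl, Or.inr rfl⟩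
  obtain ⟨⟨hi1, hi2, hi3, hi4, _⟩, _, _⟩ :=
    pvFold_inv hnn hlM lengths (fun l hl => hl) (1, M + 1) hInit
  refine ⟨hi1, by omega, hi4, fun t ht htM hf => ?_⟩
  have := pvFold_top hnn hMmem hlM hM1 ((M - t).toNat) t rfl (by omega) htM hf
  omega

-- with only non-positive rod lengths every rod loop exits at once
lemma pvFold_id {K : Int} {lengths : List Int} :
    ∀ (ls : List Int), (∀ l ∈ ls, l ≤ 0) → ∀ (st : Int × Int),
      ls.foldl (fun st length => pvRodLoop K lengths length 1 st) st = st := by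
  intro ls
  induction ls with
  | nil => intro _ st; rfl
  | cons a ls ih =>
    intro hnp st
    rw [List.foldl_cons, pvRodLoop,
      dif_neg (by have := hnp a List.mem_cons_self; omega)]
    exact ih (fun l hl => hnp l (List.mem_cons_of_mem a hl)) st

-- ===== VERDICT (by name: the statement is the Claim_ definition above) =====
theorem max_segments_length_spec : Claim_equal_max_segments_length := by
  intro N K lengths _hdom hpre
  obtain ⟨hne, hsign⟩ := hpre
  unfold Spec_max_segments_length max_segments_length max_segments_length_alt
  obtain ⟨m, hm⟩ : ∃ m, PySem.List.max? lengths (fun y => y) = some m := by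
    cases h : PySem.List.max? lengths (fun y => y) with
    | none => exact absurd ((PySem.List.max?_eq_none_iff lengths (fun y => y)).mp h) hne
    | some m => exact ⟨m, rfl⟩
  rw [hm]
  simp only [Option.getD_some]
  have hmmem : m ∈ lengths := PySem.List.max?_mem hm
  have hlm : ∀ l ∈ lengths, l ≤ m := fun l hl => PySem.List.max?_isMax hm l hl
  show pvBsLoop K lengths 1 m
      = (lengths.foldl (fun st length => pvRodLoop K lengths length 1 st) (1, m + 1)).1
  by_cases hm0 : m ≤ 0
  · -- max ≤ 0: A's loop never runs and every rod loop in B exits at once: both give 1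
    have hA : pvBsLoop K lengths 1 m = 1 := by
      rw [pvBsLoop, dif_neg (by omega)]
    rw [hA, pvFold_id lengths (fun l hl => by have := hlm l hl; omega)]
  · rcases hsign with hnn | hnp
    · exact pvIsBest_unique
        (pvBsLoop_isBest hnn _ 1 _ rfl (by omega) (Or.inr rfl) (le_refl _)
          (by intro t ht htM _; omega) (Or.inr rfl))
        (pvAlt_isBest hnn hmmem hlm (by omega))
    · exact absurd (hnp m hmmem) (by omega)
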